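-- pv_equiv track=rewrite | github.com/route-sota-anonymous/routsota | generate/get_overlap.py | get_k
-- ===== SOURCE A (Python) =====
-- def get_k(key):
--     end, j = -1, 0
--     key = key.split('-')
--     key_ = key[0]
--     for kk in key[1:]:
--         if j % 2 == 0:
--             key_ += '-'
--         else:
--             key_ += ';'
--         key_ += kk
--         j += 1
--     return key_
-- ===== SOURCE B (Python) =====
-- def get_k(key):
--     out = []
--     j = 0
--     for ch in key:
--         if ch == '-':
--             out.append('-' if j % 2 == 0 else ';')
--             j += 1
--         else:
--             out.append(ch)
--     return ''.join(out)
-- ===== Notes on version B (the rewrite author's own statement) =====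
-- stated objective: simpler
-- what changed: Replaces splitting on dashes and rejoining with alternating separators by a single character scan that copies non-dash characters and rewrites every second dash to a semicolon using a dash counter.
import Mathlib
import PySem

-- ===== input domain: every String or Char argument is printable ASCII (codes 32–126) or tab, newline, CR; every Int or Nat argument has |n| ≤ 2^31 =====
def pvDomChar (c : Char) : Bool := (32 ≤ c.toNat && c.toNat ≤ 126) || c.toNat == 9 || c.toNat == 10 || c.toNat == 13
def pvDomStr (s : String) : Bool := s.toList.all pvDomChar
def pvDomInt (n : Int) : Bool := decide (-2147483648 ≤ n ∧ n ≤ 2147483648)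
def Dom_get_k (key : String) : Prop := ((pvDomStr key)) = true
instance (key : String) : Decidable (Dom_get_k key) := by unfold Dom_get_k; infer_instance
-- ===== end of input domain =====

-- B rewrites A's split-and-rejoin as a single character scan with a dash counter (same cost, simpler).

-- ===== PORT A =====
def get_k (key : String) : String :=
  -- key = key.split('-')  (sep is non-empty, so split? is always some)
  let keyParts : List String := (PySem.Str.split? key "-").getD []
  match keyParts with
  | [] => ""                                  -- unreachable: split always yields ≥ 1 part
  | key0 :: rest =>                           -- key_ = key[0]; for kk in key[1:]:
    (rest.foldl (fun (st : String × Int) kk =>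
        ((st.1 ++ (if PySem.Int.mod st.2 2 = 0 then "-" else ";")) ++ kk, st.2 + 1))
      (key0, 0)).1

-- ===== PORT B =====
def get_k_alt (key : String) : String :=
  String.ofList
    ((key.toList.foldl (fun (st : List Char × Int) ch =>
        if ch = '-' then
          (st.1 ++ [if PySem.Int.mod st.2 2 = 0 then '-' else ';'], st.2 + 1)
        else
          (st.1 ++ [ch], st.2)) ([], 0)).1)

-- ===== PRECONDITION & SPEC =====
def Spec_get_k (key : String) (out : String) : Prop := out = get_k_alt key
instance (key : String) (out : String) : Decidable (Spec_get_k key out) := by unfold Spec_get_k; infer_instance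

-- ===== CLAIM (what is proved, stated in full; the proofs are below) =====
def Claim_equal_get_k : Prop := ∀ (key : String), Dom_get_k key → Spec_get_k key (get_k key)

-- ===== LEMMAS AND PROOFS =====

/-- Splitting a char list on a single separator char, accumulator style. -/
def pvSplit1 (c : Char) : List Char → List Char → List (List Char)
  | [], cur => [cur.reverse]
  | x :: r, cur => if x = c then cur.reverse :: pvSplit1 c r [] else pvSplit1 c r (x :: cur)

/-- The separator character A emits before the (j+1)-st piece. -/
def pvSep (j : Int) : Char := if PySem.Int.mod j 2 = 0 then '-' else ';'

/-- A's rejoin of the tail pieces, as chars. -/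
def pvJoinTail (j : Int) : List (List Char) → List Char
  | [] => []
  | p :: ps => pvSep j :: (p ++ pvJoinTail (j + 1) ps)

/-- head of the parts ++ the alternating rejoin of the rest. -/
def pvHeadJoin (parts : List (List Char)) (j : Int) : List Char :=
  match parts with
  | [] => []
  | p :: ps => p ++ pvJoinTail j ps

/-- B's single scan, as a recursive spec. -/
def pvScan : List Char → Int → List Char
  | [], _ => []
  | x :: r, j => if x = '-' then pvSep j :: pvScan r (j + 1) else x :: pvScan r j

theorem pvSplit1_ne_nil (c : Char) (cs cur : List Char) : pvSplit1 c cs cur ≠ [] := by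
  induction cs generalizing cur with
  | nil => simp [pvSplit1]
  | cons x r ih =>
    simp only [pvSplit1]
    split <;> simp [ih]

theorem splitOn_go_eq (c : Char) :
    ∀ fuel l cur acc, l.length < fuel →
      PySem.Chars.splitOn.go [c] fuel l cur acc = acc.reverse ++ pvSplit1 c l cur := by
  intro fuel
  induction fuel with
  | zero => intro l cur acc h; omega
  | succ n ih =>
    intro l cur acc h
    cases l with
    | nil => simp [PySem.Chars.splitOn.go, pvSplit1]
    | cons x r =>
      simp only [PySem.Chars.splitOn.go, List.isPrefixOf, pvSplit1]
      by_cases hx : x = c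
      · simp only [hx, beq_self_eq_true, Bool.true_and, if_pos]
        have hdrop : List.drop [c].length (c :: r) = r := by simp
        rw [hdrop, ih r [] (cur.reverse :: acc) (by simp at h; omega)]
        simp
      · have hcx : (c == x) = false := beq_eq_false_iff_ne.mpr (fun hcx => hx hcx.symm)
        rw [if_neg (by simp [hcx]), ih r (x :: cur) acc (by simp at h; omega)]
        simp [hx]

theorem splitOn_single (c : Char) (cs : List Char) :
    PySem.Chars.splitOn cs [c] = pvSplit1 c cs [] := by
  unfold PySem.Chars.splitOn
  rw [splitOn_go_eq c (cs.length + 1) cs [] [] (by omega)]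
  simp

/-- the rejoin of the split equals the single scan. -/
theorem headJoin_split_eq_scan :
    ∀ (cs cur : List Char) (j : Int),
      pvHeadJoin (pvSplit1 '-' cs cur) j = cur.reverse ++ pvScan cs j := by
  intro cs
  induction cs with
  | nil => intro cur j; simp [pvSplit1, pvHeadJoin, pvJoinTail, pvScan]
  | cons x r ih =>
    intro cur j
    simp only [pvSplit1, pvScan]
    by_cases hx : x = '-'
    · rw [if_pos hx, if_pos hx]
      obtain ⟨p, ps, hps⟩ : ∃ p ps, pvSplit1 '-' r [] = p :: ps := by
        cases h : pvSplit1 '-' r [] with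
        | nil => exact absurd h (pvSplit1_ne_nil _ _ _)
        | cons p ps => exact ⟨p, ps, rfl⟩
      have := ih [] (j + 1)
      rw [hps] at this ⊢
      simp only [pvHeadJoin, pvJoinTail, List.reverse_nil, List.nil_append] at this ⊢
      rw [this]
    · rw [if_neg hx, if_neg hx, ih (x :: cur) j]
      simp

/-- A's string fold over the mapped parts, in char terms. -/
theorem foldA_toList :
    ∀ (ps : List (List Char)) (s : List Char) (j : Int),
      ((ps.map String.ofList).foldl (fun (st : String × Int) kk =>
          ((st.1 ++ (if PySem.Int.mod st.2 2 = 0 then "-" else ";")) ++ kk, st.2 + 1))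
        (String.ofList s, j)).1.toList = s ++ pvJoinTail j ps := by
  intro ps
  induction ps with
  | nil => intro s j; simp [pvJoinTail]
  | cons p rest ih =>
    intro s j
    simp only [List.map_cons, List.foldl_cons, pvJoinTail]
    have hdash : ("-" : String).toList = ['-'] := rfl
    have hsemi : (";" : String).toList = [';'] := rfl
    have hsep : ((String.ofList s ++ (if PySem.Int.mod j 2 = 0 then "-" else ";")) ++ String.ofList p)
        = String.ofList (s ++ (pvSep j :: p)) := by
      apply String.toList_inj.mp
      unfold pvSep
      rcases eq_or_ne (PySem.Int.mod j 2) 0 with hm | hm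
      · rw [if_pos hm, if_pos hm]; simp [hdash]
      · rw [if_neg hm, if_neg hm]; simp [hsemi]
    rw [hsep, ih]
    simp

/-- B's char fold equals the scan. -/
theorem foldB_eq_scan :
    ∀ (cs acc : List Char) (j : Int),
      (cs.foldl (fun (st : List Char × Int) ch =>
          if ch = '-' then
            (st.1 ++ [if PySem.Int.mod st.2 2 = 0 then '-' else ';'], st.2 + 1)
          else
            (st.1 ++ [ch], st.2)) (acc, j)).1 = acc ++ pvScan cs j := by
  intro cs
  induction cs with
  | nil => intro acc j; simp [pvScan]
  | cons x r ih =>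
    intro acc j
    simp only [List.foldl_cons, pvScan]
    by_cases hx : x = '-'
    · rw [if_pos hx, if_pos hx, ih]
      simp [pvSep]
    · rw [if_neg hx, if_neg hx, ih]
      simp

theorem get_k_eq_scan (key : String) : get_k key = String.ofList (pvScan key.toList 0) := by
  unfold get_k
  have hsplit : PySem.Str.split? key "-" =
      some ((PySem.Chars.splitOn key.toList ['-']).map String.ofList) := by
    simp [PySem.Str.split?, PySem.Chars.split?]
  rw [hsplit]
  simp only [Option.getD_some, splitOn_single]
  obtain ⟨p, ps, hps⟩ : ∃ p ps, pvSplit1 '-' key.toList [] = p :: ps := by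
    cases h : pvSplit1 '-' key.toList [] with
    | nil => exact absurd h (pvSplit1_ne_nil _ _ _)
    | cons p ps => exact ⟨p, ps, rfl⟩
  rw [hps]
  simp only [List.map_cons]
  apply String.toList_inj.mp
  rw [foldA_toList ps p 0]
  have := headJoin_split_eq_scan key.toList [] 0
  rw [hps] at this
  simpa [pvHeadJoin] using this

theorem get_k_alt_eq_scan (key : String) : get_k_alt key = String.ofList (pvScan key.toList 0) := by
  unfold get_k_alt
  rw [foldB_eq_scan key.toList [] 0, List.nil_append]

-- ===== VERDICT (by name: the statement is the Claim_ definition above) =====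
theorem get_k_spec : Claim_equal_get_k := by
  intro key _
  unfold Spec_get_k
  rw [get_k_eq_scan, get_k_alt_eq_scan]
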